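-- pv_equiv track=rewrite | github.com/SungHyunShin/Programming-Challenges-Contest-II | challengeIID/program.py | buildedgeL
-- ===== SOURCE A (Python) =====
-- def isWordMorph(w1,w2):
-- 	diff = 0
-- 	# if w2 is 1 char longer
-- 	if len(w1)+1 == len(w2):
-- 		if w1[0] is not w2[0]:
-- 			w2 = w2[1:]
-- 			diff += 1
-- 		elif w1[-1] is not w2[-1]:
-- 			w2 = w2[:-1]
-- 			diff += 1
-- 	# else if w1 is 1 char longer
-- 	elif len(w1) == len(w2)+1:
-- 		if w1[0] is not w2[0]:
-- 			w1 = w1[1:]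
-- 			diff += 1
-- 		elif w1[-1] is not w2[-1]:
-- 			w1 = w1[:-1]
-- 			diff += 1
-- 	# else if they're not the same length
-- 	elif len(w1) is not len(w2):
-- 		return False
-- 	# if they're equal lengths or 1 char longer than each other
-- 	if len(w1) == len(w2):
-- 		for i in range(len(w1)):
-- 			if w1[i] is not w2[i]:
-- 				diff +=1
-- 		# if there's one or less differences
-- 		return diff <= 1
-- 	# else return false
-- 	else:
-- 		return False
--
-- def buildedgeL(wordL):
-- 	edgeL = []
-- 	for i in range(len(wordL)):
-- 		edgeL.append([])
-- 	for i in range(len(wordL)):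
-- 		for j in range(i+1, len(wordL)):
-- 			if isWordMorph(wordL[j],wordL[i]):
-- 				edgeL[i].append(j)
-- 	return edgeL
-- ===== SOURCE B (Python) =====
-- # Faster rewrite: index every word once under identity / one-wildcard / end-trim
-- # signatures; each word's neighbour index list is computed once per distinct word
-- # from the candidates in its shared buckets (confirmed by a direct morph test)
-- # and each row is the part of that list after the current position.
--
-- def _morph(a, b):
--     if len(a) == len(b):
--         return sum(x != y for x, y in zip(a, b)) <= 1
--     if len(b) == len(a) + 1:
--         a, b = b, a
--     if len(a) != len(b) + 1:
--         return False
--     if a[0] != b[0]: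
--         return a[1:] == b
--     if a[-1] != b[-1]:
--         return a[:-1] == b
--     return False
--
-- def _keys(w):
--     ks = [("w", 0, w, ""), ("w", 0, w[1:], ""), ("w", 0, w[:-1], "")]
--     for p in range(len(w)):
--         ks.append(("s", p, w[:p], w[p + 1:]))
--     return ks
--
-- def buildedgeL(wordL):
--     buckets = {}
--     for i, w in enumerate(wordL):
--         for k in _keys(w):
--             buckets.setdefault(k, []).append(i)
--     matches = {}
--     edgeL = []
--     for i, w in enumerate(wordL):
--         if w not in matches:
--             cand = sorted({j for k in _keys(w) for j in buckets.get(k, ())})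
--             matches[w] = [j for j in cand if _morph(wordL[j], w)]
--         edgeL.append([j for j in matches[w] if j > i])
--     return edgeL
-- ===== Notes on version B (the rewrite author's own statement) =====
-- stated objective: faster
-- what changed: Instead of testing all O(n^2) pairs, B indexes every word once under identity/one-wildcard/end-trim signature keys, computes each distinct word's neighbour list once from the candidates in its shared buckets (confirmed by a direct morph test), and cuts that list after the current position for each row; …
-- outside the precondition, e.g. on buildedgeL(['', 'x']): A raises IndexError, B raises IndexError
import Mathlib
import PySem

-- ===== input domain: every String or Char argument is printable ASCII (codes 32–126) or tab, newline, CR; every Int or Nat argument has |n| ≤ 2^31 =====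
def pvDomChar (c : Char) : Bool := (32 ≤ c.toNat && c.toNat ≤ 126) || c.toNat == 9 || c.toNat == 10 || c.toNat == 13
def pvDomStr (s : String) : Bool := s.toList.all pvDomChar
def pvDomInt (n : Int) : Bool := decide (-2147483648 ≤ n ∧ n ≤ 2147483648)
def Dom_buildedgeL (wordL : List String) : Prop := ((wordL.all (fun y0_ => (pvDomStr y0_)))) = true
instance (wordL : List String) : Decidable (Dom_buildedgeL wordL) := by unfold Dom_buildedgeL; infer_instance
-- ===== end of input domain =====

-- B replaces A's all-pairs scan by a signature index: each word is bucketed once under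
-- identity / one-wildcard / end-trim keys, each distinct word's neighbour list is built
-- once from the candidates in its shared buckets (confirmed by a direct morph test),
-- and each row is that list cut after the current position (objective: faster).

-- ===== PORT A =====
-- `w1[i] is not w2[i]` on 1-char ASCII strings is `≠` (CPython interns them; Dom is ASCII).
-- The equal-length `for i in range(len(w1))` mismatch count is the countP over the zip.
def pvCnt (a b : List Char) : Nat := (List.zip a b).countP (fun p => p.1 != p.2)

-- Literal port of isWordMorph on the char lists. `w1[0]`/`w1[-1]` are head?/getLast?
-- (the `none` cases are Python's IndexError, excluded by Pre_). `len(w1) is not len(w2)`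
-- is `≠` for lengths ≤ 256 (Pre_ keeps the larger equal-length pairs out); that elif's
-- `return False` is subsumed by the final length test, which an unequal un-trimmed pair
-- always fails.
def pvMorph (w1 w2 : List Char) : Bool :=
  let s : List Char × List Char × Nat :=
    if w1.length + 1 = w2.length then
      if w1.head? ≠ w2.head? then (w1, (w2.drop 1, 1))
      else if w1.getLast? ≠ w2.getLast? then (w1, (w2.dropLast, 1))
      else (w1, (w2, 0))
    else if w1.length = w2.length + 1 then
      if w1.head? ≠ w2.head? then (w1.drop 1, (w2, 1))
      else if w1.getLast? ≠ w2.getLast? then (w1.dropLast, (w2, 1))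
      else (w1, (w2, 0))
    else (w1, (w2, 0))
  if s.1.length = s.2.1.length then decide (s.2.2 + pvCnt s.1 s.2.1 ≤ 1) else false

-- the two nested index loops; row i is only ever appended to during outer iteration i
def buildedgeL (wordL : List String) : List (List Int) :=
  let n : Int := PySem.List.len wordL
  (PySem.List.pyRange 0 n 1).map (fun i =>
    (PySem.List.pyRange (i + 1) n 1).foldl (fun acc j =>
      if pvMorph (PySem.List.pyGetD wordL j "").toList (PySem.List.pyGetD wordL i "").toList
      then acc ++ [j] else acc) [])

-- ===== PORT B =====
-- Source B's _morph: `sum(x != y for x, y in zip(a, b))` is the Int sum below; a[0]/a[-1] are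
-- head?/getLast? (the `none` case is the IndexError outside Pre_), a[1:]/a[:-1] drop 1/dropLast.
def pvHamB (a b : List Char) : Int :=
  ((List.zip a b).map (fun p => if p.1 != p.2 then (1 : Int) else 0)).sum

def pvMorphB (a b : List Char) : Bool :=
  if a.length = b.length then decide (pvHamB a b ≤ 1)
  else
    let p : List Char × List Char :=
      if b.length = a.length + 1 then (b, a) else (a, b)
    if p.1.length ≠ p.2.length + 1 then false
    else if p.1.head? ≠ p.2.head? then p.1.drop 1 == p.2
    else if p.1.getLast? ≠ p.2.getLast? then p.1.dropLast == p.2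
    else false

-- Source B's _keys: identity, the two end trims, and one wildcard key per position
def pvKeysB (w : List Char) : List (String × Int × List Char × List Char) :=
  [("w", 0, w, []), ("w", 0, w.drop 1, []), ("w", 0, w.dropLast, [])]
  ++ (List.range w.length).map (fun (p : Nat) => ("s", (p : Int), w.take p, w.drop (p + 1)))

-- buckets.setdefault(k, []).append(i), over the nested for-loops
def pvBucketsB (wordL : List String) : PySem.Dict (String × Int × List Char × List Char) (List Int) :=
  ((PySem.List.enumerate wordL).flatMap
      (fun iw => (pvKeysB iw.2.toList).map (fun k => (k, iw.1)))).foldl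
    (fun d p => PySem.Dict.modify d p.1 [] (· ++ [p.2])) PySem.Dict.empty

-- cand = {j for k in _keys(w) for j in buckets.get(k, ())}
def pvCandB (wordL : List String) (w : String) : PySem.Set Int :=
  (pvKeysB w.toList).foldl (fun s k =>
    (PySem.Dict.getD (pvBucketsB wordL) k []).foldl
      (fun s j => PySem.Set.add s j) s) PySem.Set.empty

-- matches[w] = [j for j in sorted(cand) if _morph(wordL[j], w)]; sorted consumes the set
-- order-independently
def pvMatchesB (wordL : List String) (w : String) : List Int :=
  (PySem.List.sorted (pvCandB wordL w) (fun x => x) false).filter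
    (fun j => pvMorphB (PySem.List.pyGetD wordL j "").toList w.toList)

-- the main loop: the matches memo keyed by the word, a row per index
def buildedgeL_alt (wordL : List String) : List (List Int) :=
  ((PySem.List.enumerate wordL).foldl
    (fun st iw =>
      let m := if st.1.contains iw.2 then st.1
               else st.1.insert iw.2 (pvMatchesB wordL iw.2)
      (m, st.2 ++ [(m.getD iw.2 []).filter (fun j => decide (iw.1 < j))]))
    ((PySem.Dict.empty : PySem.Dict String (List Int)), ([] : List (List Int)))).2

-- ===== PRECONDITION & SPEC =====
-- Pre_ excludes (a) lists holding both an empty and a 1-char word, on which A's isWordMorph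
-- raises IndexError, and (b) lists with two equal-length words longer than 256 chars at
-- Hamming distance ≤ 1, where A's `len(w1) is not len(w2)` compares uncached CPython int
-- objects (an interning artefact) and A silently drops the pair; B keeps it.
def Pre_buildedgeL (wordL : List String) : Prop :=
  (¬ ((∃ w ∈ wordL, w.toList.length = 0) ∧ (∃ w ∈ wordL, w.toList.length = 1)))
  ∧ wordL.Pairwise (fun a b =>
      ¬ (256 < a.toList.length ∧ a.toList.length = b.toList.length ∧
         (List.zip a.toList b.toList).countP (fun p => p.1 != p.2) ≤ 1))
instance (wordL : List String) : Decidable (Pre_buildedgeL wordL) := by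
  unfold Pre_buildedgeL; infer_instance
def pvWitness_buildedgeL : List String := ["cat", "cot", "dog", "do"]

def Spec_buildedgeL (wordL : List String) (out : List (List Int)) : Prop := out = buildedgeL_alt wordL
instance (wordL : List String) (out : List (List Int)) : Decidable (Spec_buildedgeL wordL out) := by unfold Spec_buildedgeL; infer_instance

-- ===== CLAIM (what is proved, stated in full; the proofs are below) =====
def Claim_equal_buildedgeL : Prop := ∀ (wordL : List String), Dom_buildedgeL wordL → Pre_buildedgeL wordL → Spec_buildedgeL wordL (buildedgeL wordL)

-- ===== LEMMAS AND PROOFS =====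

theorem pv_cnt_zero_iff (a b : List Char) (h : a.length = b.length) :
    pvCnt a b = 0 ↔ a = b := by
  induction a generalizing b with
  | nil => cases b <;> simp_all [pvCnt]
  | cons x a ih =>
    cases b with
    | nil => simp at h
    | cons y b =>
      simp only [List.length_cons, Nat.add_right_cancel_iff] at h
      simp only [pvCnt, List.zip_cons_cons, List.countP_cons] at *
      rw [List.cons_eq_cons]
      constructor
      · intro hz
        have h1 : (List.zip a b).countP (fun p => p.1 != p.2) = 0 := by omega
        have h2 : ¬ (x != y) = true := by by_contra hc; simp [hc] at hz
        simp at h2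
        exact ⟨h2, (ih b h).1 h1⟩
      · rintro ⟨rfl, rfl⟩
        have := (ih a h).2 rfl
        simp [this]

theorem pv_cnt_le_one_iff (a b : List Char) (h : a.length = b.length) :
    pvCnt a b ≤ 1 ↔ (a = b ∨ ∃ p, p < a.length ∧ a.take p = b.take p ∧
      a.drop (p + 1) = b.drop (p + 1)) := by
  induction a generalizing b with
  | nil => cases b <;> simp_all [pvCnt]
  | cons x a ih =>
    cases b with
    | nil => simp at h
    | cons y b =>
      simp only [List.length_cons, Nat.add_right_cancel_iff] at h
      by_cases hxy : x = y
      · subst hxy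
        simp only [pvCnt, List.zip_cons_cons, List.countP_cons, bne_self_eq_false,
          if_neg, Bool.false_eq_true, not_false_eq_true, Nat.add_zero] at *
        rw [ih b h]
        constructor
        · rintro (rfl | ⟨p, hp, ht, hd⟩)
          · exact Or.inl rfl
          · refine Or.inr ⟨p + 1, by simp only [List.length_cons]; omega, ?_, ?_⟩ <;> simp [List.take_succ_cons, ht, hd]
        · rintro (hab | ⟨p, hp, ht, hd⟩)
          · exact Or.inl (by injection hab)
          · cases p with
            | zero => simp at hd; exact Or.inl hd
            | succ p =>
              refine Or.inr ⟨p, by simp only [List.length_cons] at hp ⊢; omega, ?_, ?_⟩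
              · simpa using ht
              · simpa using hd
      · have hb : (x != y) = true := by simpa using hxy
        have hcnt : pvCnt (x :: a) (y :: b) = pvCnt a b + 1 := by
          simp [pvCnt, hb]
        rw [hcnt]
        constructor
        · intro hle
          have h0 : pvCnt a b = 0 := by omega
          have := (pv_cnt_zero_iff a b h).1 h0
          refine Or.inr ⟨0, by simp, by simp, by simpa using this⟩
        · rintro (hab | ⟨p, hp, ht, hd⟩)
          · exact absurd (by injection hab) hxy
          · cases p with
            | zero =>
              simp only [List.drop_succ_cons, List.drop_zero] at hd
              have := (pv_cnt_zero_iff a b h).2 hd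
              omega
            | succ p =>
              have : x = y := by simpa [List.take_succ_cons] using congrArg (·.head?) ht
              exact absurd this hxy

theorem pv_morph_eq (a b : List Char) (h : a.length = b.length) :
    pvMorph a b = true ↔ pvCnt a b ≤ 1 := by
  have h0 : ¬ (b.length + 1 = b.length) := by omega
  have h1 : ¬ (a.length + 1 = b.length) := by omega
  have h2 : ¬ (a.length = b.length + 1) := by omega
  simp [pvMorph, h]

theorem pv_morph_far (a b : List Char) (hf1 : ¬ (a.length + 1 = b.length))
    (hf2 : ¬ (a.length = b.length + 1)) (hf3 : ¬ (a.length = b.length)) :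
    pvMorph a b = false := by
  simp [pvMorph, hf1, hf2, hf3]

theorem pv_morph_long (a b : List Char) (h : a.length = b.length + 1) :
    pvMorph a b = true ↔ (¬ a.head? = b.head? ∧ a.drop 1 = b) ∨
      (a.head? = b.head? ∧ ¬ a.getLast? = b.getLast? ∧ a.dropLast = b) := by
  have h1 : ¬ (a.length + 1 = b.length) := by omega
  have h2 : ¬ (b.length + 1 + 1 = b.length) := by omega
  by_cases hh : a.head? = b.head?
  · by_cases hl : a.getLast? = b.getLast?
    · have h3 : ¬ (a.length = b.length) := by omega
      have : pvMorph a b = false := by simp [pvMorph, h2, h, hh, hl]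
      rw [this]
      constructor
      · intro hc; cases hc
      · rintro (⟨hne, _⟩ | ⟨_, hlne, _⟩)
        · exact absurd hh hne
        · exact absurd hl hlne
    · have hlen : a.dropLast.length = b.length := by simp [List.length_dropLast]; omega
      have key : pvMorph a b = true ↔
          (a.dropLast.length = b.length ∧ 1 + pvCnt a.dropLast b ≤ 1) := by
        simp [pvMorph, h2, h, hh, hl]
      rw [key]
      constructor
      · rintro ⟨-, hc⟩
        exact Or.inr ⟨hh, hl, (pv_cnt_zero_iff _ _ hlen).1 (by omega)⟩
      · rintro (⟨hne, _⟩ | ⟨-, -, he⟩)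
        · exact absurd hh hne
        · have := (pv_cnt_zero_iff _ _ hlen).2 he
          exact ⟨hlen, by omega⟩
  · have hlen : a.tail.length = b.length := by simp [List.length_tail]; omega
    have key : pvMorph a b = true ↔
        (a.tail.length = b.length ∧ 1 + pvCnt a.tail b ≤ 1) := by
      simp [pvMorph, h2, h, hh]
    rw [key]
    rw [← List.drop_one]
    constructor
    · rintro ⟨-, hc⟩
      exact Or.inl ⟨hh, (pv_cnt_zero_iff _ _ (by simpa using hlen)).1 (by omega)⟩
    · rintro (⟨-, he⟩ | ⟨heq, -, -⟩)
      · have := (pv_cnt_zero_iff _ _ (by simpa using hlen)).2 he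
        exact ⟨by simpa using hlen, by omega⟩
      · exact absurd heq hh

theorem pv_morph_short (a b : List Char) (h : a.length + 1 = b.length) :
    pvMorph a b = true ↔ (¬ a.head? = b.head? ∧ a = b.drop 1) ∨
      (a.head? = b.head? ∧ ¬ a.getLast? = b.getLast? ∧ a = b.dropLast) := by
  by_cases hh : a.head? = b.head?
  · by_cases hl : a.getLast? = b.getLast?
    · have h3 : ¬ (a.length = b.length) := by omega
      have : pvMorph a b = false := by simp [pvMorph, h, hh, hl, h3]
      rw [this]
      constructor
      · intro hc; cases hc
      · rintro (⟨hne, _⟩ | ⟨_, hlne, _⟩)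
        · exact absurd hh hne
        · exact absurd hl hlne
    · have hlen : a.length = b.dropLast.length := by simp [List.length_dropLast]; omega
      have key : pvMorph a b = true ↔
          (a.length = b.dropLast.length ∧ 1 + pvCnt a b.dropLast ≤ 1) := by
        simp [pvMorph, h, hh, hl]
      rw [key]
      constructor
      · rintro ⟨-, hc⟩
        exact Or.inr ⟨hh, hl, (pv_cnt_zero_iff _ _ hlen).1 (by omega)⟩
      · rintro (⟨hne, _⟩ | ⟨-, -, he⟩)
        · exact absurd hh hne
        · have := (pv_cnt_zero_iff _ _ hlen).2 he
          exact ⟨hlen, by omega⟩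
  · have hlen : a.length = b.tail.length := by simp [List.length_tail]; omega
    have key : pvMorph a b = true ↔
        (a.length = b.tail.length ∧ 1 + pvCnt a b.tail ≤ 1) := by
      simp [pvMorph, h, hh]
    rw [key, ← List.drop_one]
    constructor
    · rintro ⟨-, hc⟩
      exact Or.inl ⟨hh, (pv_cnt_zero_iff _ _ (by simpa using hlen)).1 (by omega)⟩
    · rintro (⟨-, he⟩ | ⟨heq, -, -⟩)
      · have := (pv_cnt_zero_iff _ _ (by simpa using hlen)).2 he
        exact ⟨by simpa using hlen, by omega⟩
      · exact absurd heq hh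

-- B's bool-sum Hamming count is A's countP count
theorem pv_hamB_eq (a b : List Char) : pvHamB a b = (pvCnt a b : Int) := by
  unfold pvHamB pvCnt
  exact PySem.List.sum_map_ite_one_zero (fun p => p.1 != p.2) (List.zip a b)

-- the two morph tests agree on every pair of words
theorem pv_morphB_eq (a b : List Char) : pvMorphB a b = pvMorph a b := by
  by_cases hE : a.length = b.length
  · rw [Bool.eq_iff_iff, pv_morph_eq a b hE]
    simp [pvMorphB, hE, pv_hamB_eq]
  by_cases hL : a.length = b.length + 1
  · have hswap : ¬ (b.length = a.length + 1) := by omega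
    rw [Bool.eq_iff_iff, pv_morph_long a b hL]
    unfold pvMorphB
    rw [if_neg hE, if_neg hswap]
    dsimp only
    rw [if_neg (by omega : ¬ (a.length ≠ b.length + 1))]
    by_cases hh : a.head? = b.head?
    · rw [if_neg (not_not_intro hh)]
      by_cases hl : a.getLast? = b.getLast?
      · rw [if_neg (not_not_intro hl)]
        constructor
        · intro hc; cases hc
        · rintro (⟨hne, -⟩ | ⟨-, hlne, -⟩)
          · exact absurd hh hne
          · exact absurd hl hlne
      · rw [if_pos hl]
        constructor
        · intro hbe; exact Or.inr ⟨hh, hl, beq_iff_eq.1 hbe⟩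
        · rintro (⟨hne, -⟩ | ⟨-, -, hd⟩)
          · exact absurd hh hne
          · exact beq_iff_eq.2 hd
    · rw [if_pos hh]
      constructor
      · intro hbe; exact Or.inl ⟨hh, beq_iff_eq.1 hbe⟩
      · rintro (⟨-, hd⟩ | ⟨heq, -, -⟩)
        · exact beq_iff_eq.2 hd
        · exact absurd heq hh
  by_cases hS : a.length + 1 = b.length
  · have hswap : b.length = a.length + 1 := by omega
    rw [Bool.eq_iff_iff, pv_morph_short a b hS]
    unfold pvMorphB
    rw [if_neg hE, if_pos hswap]
    dsimp only
    rw [if_neg (by omega : ¬ (b.length ≠ a.length + 1))]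
    by_cases hh : b.head? = a.head?
    · rw [if_neg (not_not_intro hh)]
      by_cases hl : b.getLast? = a.getLast?
      · rw [if_neg (not_not_intro hl)]
        constructor
        · intro hc; cases hc
        · rintro (⟨hne, -⟩ | ⟨-, hlne, -⟩)
          · exact absurd hh.symm hne
          · exact absurd hl.symm hlne
      · rw [if_pos hl]
        constructor
        · intro hbe
          exact Or.inr ⟨hh.symm, fun hc => hl hc.symm, (beq_iff_eq.1 hbe).symm⟩
        · rintro (⟨hne, -⟩ | ⟨-, -, hd⟩)
          · exact absurd hh.symm hne
          · exact beq_iff_eq.2 hd.symm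
    · rw [if_pos hh]
      constructor
      · intro hbe
        exact Or.inl ⟨fun hc => hh hc.symm, (beq_iff_eq.1 hbe).symm⟩
      · rintro (⟨-, hd⟩ | ⟨heq, -, -⟩)
        · exact beq_iff_eq.2 hd.symm
        · exact absurd heq.symm hh
  · rw [pv_morph_far a b (by omega) (by omega) hE]
    unfold pvMorphB
    rw [if_neg hE, if_neg (by omega : ¬ (b.length = a.length + 1))]
    dsimp only
    rw [if_pos (show a.length ≠ b.length + 1 from hL)]

theorem pv_mem_pvKeysB (k : String × Int × List Char × List Char) (w : List Char) :
    k ∈ pvKeysB w ↔ k = ("w", 0, w, []) ∨ k = ("w", 0, w.drop 1, []) ∨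
      k = ("w", 0, w.dropLast, []) ∨
      (∃ p, p < w.length ∧ k = ("s", (p : Int), w.take p, w.drop (p + 1))) := by
  simp [pvKeysB, eq_comm]

-- candidate completeness: any morph pair shares a signature key
theorem pv_shared (a b : List Char) (h : pvMorph a b = true) :
    ∃ k, k ∈ pvKeysB a ∧ k ∈ pvKeysB b := by
  by_cases hE : a.length = b.length
  · rw [pv_morph_eq a b hE, pv_cnt_le_one_iff a b hE] at h
    rcases h with rfl | ⟨p, hp, ht, hd⟩
    · exact ⟨("w", 0, a, []), by rw [pv_mem_pvKeysB]; tauto, by rw [pv_mem_pvKeysB]; tauto⟩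
    · refine ⟨("s", (p : Int), a.take p, a.drop (p + 1)),
        (pv_mem_pvKeysB _ a).2 (Or.inr (Or.inr (Or.inr ⟨p, hp, rfl⟩))),
        (pv_mem_pvKeysB _ b).2 (Or.inr (Or.inr (Or.inr ⟨p, by omega, by rw [ht, hd]⟩)))⟩
  by_cases hL : a.length = b.length + 1
  · rw [pv_morph_long a b hL] at h
    rcases h with ⟨-, hd⟩ | ⟨-, -, hd⟩
    · exact ⟨("w", 0, b, []), (pv_mem_pvKeysB _ a).2 (Or.inr (Or.inl (by rw [hd]))),
        (pv_mem_pvKeysB _ b).2 (Or.inl rfl)⟩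
    · exact ⟨("w", 0, b, []), (pv_mem_pvKeysB _ a).2 (Or.inr (Or.inr (Or.inl (by rw [hd])))),
        (pv_mem_pvKeysB _ b).2 (Or.inl rfl)⟩
  by_cases hS : a.length + 1 = b.length
  · rw [pv_morph_short a b hS] at h
    rcases h with ⟨-, hd⟩ | ⟨-, -, hd⟩
    · exact ⟨("w", 0, a, []), (pv_mem_pvKeysB _ a).2 (Or.inl rfl),
        (pv_mem_pvKeysB _ b).2 (Or.inr (Or.inl (by rw [hd])))⟩
    · exact ⟨("w", 0, a, []), (pv_mem_pvKeysB _ a).2 (Or.inl rfl),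
        (pv_mem_pvKeysB _ b).2 (Or.inr (Or.inr (Or.inl (by rw [hd]))))⟩
  · rw [pv_morph_far a b (by omega) (by omega) hE] at h
    cases h

theorem pv_outer_mem (ks : List (String × Int × List Char × List Char))
    (B : String × Int × List Char × List Char → List Int) (s : PySem.Set Int) (x : Int) :
    x ∈ ks.foldl (fun s k => (B k).foldl (fun s j => PySem.Set.add s j) s) s ↔
      x ∈ s ∨ ∃ k ∈ ks, x ∈ B k := by
  induction ks generalizing s with
  | nil => simp
  | cons k ks ih =>
    simp only [List.foldl_cons]
    rw [ih]
    have hup : (B k).foldl (fun s j => PySem.Set.add s j) s = PySem.Set.update s (B k) := rfl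
    rw [hup, PySem.Set.mem_update]
    simp only [List.mem_cons]
    constructor
    · rintro ((hs | hb) | ⟨k', hk', hb⟩)
      · exact Or.inl hs
      · exact Or.inr ⟨k, Or.inl rfl, hb⟩
      · exact Or.inr ⟨k', Or.inr hk', hb⟩
    · rintro (hs | ⟨k', (rfl | hk'), hb⟩)
      · exact Or.inl (Or.inl hs)
      · exact Or.inl (Or.inr hb)
      · exact Or.inr ⟨k', hk', hb⟩

theorem pv_outer_nodup (ks : List (String × Int × List Char × List Char))
    (B : String × Int × List Char × List Char → List Int) (s : PySem.Set Int)
    (hs : s.Nodup) :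
    (ks.foldl (fun s k => (B k).foldl (fun s j => PySem.Set.add s j) s) s).Nodup := by
  induction ks generalizing s with
  | nil => exact hs
  | cons k ks ih =>
    simp only [List.foldl_cons]
    have hup : (B k).foldl (fun s j => PySem.Set.add s j) s = PySem.Set.update s (B k) := rfl
    rw [hup]
    exact ih _ (PySem.Set.nodup_update s (B k) hs)

-- what a bucket holds
theorem pv_mem_bucket (ps : List (Int × String)) (k : String × Int × List Char × List Char)
    (x : Int) :
    x ∈ ((ps.flatMap (fun iw => (pvKeysB iw.2.toList).map (fun kk => (kk, iw.1)))).foldl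
        (fun d p => PySem.Dict.modify d p.1 [] (· ++ [p.2])) PySem.Dict.empty).getD k [] ↔
      ∃ iw ∈ ps, k ∈ pvKeysB iw.2.toList ∧ x = iw.1 := by
  rw [PySem.Dict.getD_foldl_modify_append, PySem.Dict.getD_empty]
  simp only [List.nil_append, List.mem_map, List.mem_filter, List.mem_flatMap]
  constructor
  · rintro ⟨⟨kk, m⟩, ⟨⟨iw, hiw, kk2, hkk2, hpair⟩, hbeq⟩, rfl⟩
    have h1 : kk2 = kk ∧ iw.1 = m := by
      exact ⟨congrArg Prod.fst hpair, congrArg Prod.snd hpair⟩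
    obtain ⟨rfl, h2⟩ := h1
    have : kk2 = k := by simpa using hbeq
    subst this
    exact ⟨iw, hiw, hkk2, h2.symm⟩
  · rintro ⟨iw, hiw, hk, rfl⟩
    exact ⟨(k, iw.1), ⟨⟨iw, hiw, ⟨k, hk, rfl⟩⟩, by simp⟩, rfl⟩

-- membership in the candidate set of a word
theorem pv_cand_mem (wordL : List String) (w : String) (x : Int) :
    x ∈ pvCandB wordL w ↔
      (x ∈ PySem.List.pyRange 0 (PySem.List.len wordL) 1 ∧
        ∃ k ∈ pvKeysB w.toList, k ∈ pvKeysB (PySem.List.pyGetD wordL x "").toList) := by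
  unfold pvCandB
  rw [pv_outer_mem]
  simp only [PySem.Set.empty, List.not_mem_nil, false_or]
  unfold pvBucketsB
  constructor
  · rintro ⟨k, hk, hb⟩
    obtain ⟨iw, hiw, hkk, rfl⟩ := (pv_mem_bucket _ k x).1 hb
    rw [PySem.List.enumerate_eq_map_pyRange wordL ""] at hiw
    simp only [List.mem_map] at hiw
    obtain ⟨j, hj, rfl⟩ := hiw
    exact ⟨hj, k, hk, hkk⟩
  · rintro ⟨hx, k, hk, hkk⟩
    refine ⟨k, hk, (pv_mem_bucket _ k x).2 ?_⟩
    refine ⟨(x, PySem.List.pyGetD wordL x ""), ?_, hkk, rfl⟩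
    rw [PySem.List.enumerate_eq_map_pyRange wordL ""]
    simp only [List.mem_map]
    exact ⟨x, hx, rfl⟩

-- a word's match list is exactly the ascending list of its morph partners' indices
theorem pv_matches_eq (wordL : List String) (w : String) :
    pvMatchesB wordL w =
      (PySem.List.pyRange 0 (PySem.List.len wordL) 1).filter
        (fun j => pvMorphB (PySem.List.pyGetD wordL j "").toList w.toList) := by
  unfold pvMatchesB
  have hnodup : (pvCandB wordL w).Nodup := by
    unfold pvCandB
    exact pv_outer_nodup _ _ _ List.nodup_nil
  have hpairf := (PySem.List.pairwise_lt_pyRange_one 0 (PySem.List.len wordL)).filter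
    (fun j => decide (j ∈ pvCandB wordL w))
  have hsorted : PySem.List.sorted (pvCandB wordL w) (fun x => x) false =
      (PySem.List.pyRange 0 (PySem.List.len wordL) 1).filter
        (fun j => decide (j ∈ pvCandB wordL w)) := by
    apply PySem.List.sorted_eq_of_perm_of_pairwise_lt _ _ _ ?_ hpairf
    refine (List.perm_ext_iff_of_nodup (hpairf.imp ne_of_lt) hnodup).2 ?_
    intro x
    rw [List.mem_filter]
    simp only [decide_eq_true_eq]
    constructor
    · rintro ⟨-, h⟩; exact h
    · intro h; exact ⟨((pv_cand_mem wordL w x).1 h).1, h⟩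
  rw [hsorted, List.filter_filter]
  apply List.filter_congr
  intro j hj
  by_cases hm : pvMorphB (PySem.List.pyGetD wordL j "").toList w.toList = true
  · have hc : j ∈ pvCandB wordL w := by
      apply (pv_cand_mem wordL w j).2
      refine ⟨hj, ?_⟩
      have hmor : pvMorph (PySem.List.pyGetD wordL j "").toList w.toList = true := by
        rw [← pv_morphB_eq]; exact hm
      obtain ⟨k, hka, hkb⟩ := pv_shared _ _ hmor
      exact ⟨k, hkb, hka⟩
    simp [hm, hc]
  · simp [hm]

-- the main loop emits, for each position, the memoised match list cut after it
theorem pv_fold_rows (wordL : List String) (l : List (Int × String))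
    (d : PySem.Dict String (List Int)) (acc : List (List Int))
    (hd : ∀ w, d.contains w = true → d.getD w [] = pvMatchesB wordL w) :
    (l.foldl (fun st iw =>
        let m := if st.1.contains iw.2 then st.1
                 else st.1.insert iw.2 (pvMatchesB wordL iw.2)
        (m, st.2 ++ [(m.getD iw.2 []).filter (fun j => decide (iw.1 < j))])) (d, acc)).2
      = acc ++ l.map (fun iw => (pvMatchesB wordL iw.2).filter (fun j => decide (iw.1 < j))) := by
  induction l generalizing d acc with
  | nil => simp
  | cons iw l ih =>
    simp only [List.foldl_cons, List.map_cons]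
    by_cases hc : d.contains iw.2 = true
    · dsimp only
      rw [if_pos hc, hd iw.2 hc, ih d _ hd]
      simp
    · dsimp only
      rw [if_neg hc, PySem.Dict.getD_insert_self]
      rw [ih _ _ ?_]
      · simp
      · intro w hw
        rw [PySem.Dict.contains_insert] at hw
        by_cases hwe : w = iw.2
        · subst hwe
          exact PySem.Dict.getD_insert_self d iw.2 (pvMatchesB wordL iw.2) []
        · have hcw : d.contains w = true := by
            rcases Bool.or_eq_true_iff.1 hw with h | h
            · exact absurd (by simpa using h) hwe
            · exact h
          rw [PySem.Dict.getD_insert_of_ne _ _ _ hwe]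
          exact hd w hcw

theorem pv_spec (wordL : List String) : buildedgeL wordL = buildedgeL_alt wordL := by
  unfold buildedgeL buildedgeL_alt
  rw [pv_fold_rows wordL (PySem.List.enumerate wordL) PySem.Dict.empty []
      (by intro w hw; rw [PySem.Dict.contains_empty] at hw; cases hw)]
  rw [List.nil_append]
  rw [PySem.List.enumerate_eq_map_pyRange wordL "", List.map_map]
  apply List.map_congr_left
  intro i hi
  rw [PySem.List.mem_pyRange_one] at hi
  simp only [Function.comp]
  rw [PySem.List.foldl_append_if
    (fun j => pvMorph (PySem.List.pyGetD wordL j "").toList (PySem.List.pyGetD wordL i "").toList)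
    (fun j => j), List.nil_append, List.map_id']
  rw [pv_matches_eq, List.filter_filter]
  rw [PySem.List.pyRange_one_append 0 (i + 1) (PySem.List.len wordL) (by omega) (by omega)]
  rw [List.filter_append]
  have h1 : (PySem.List.pyRange 0 (i + 1) 1).filter (fun j =>
      decide (i < j) && pvMorphB (PySem.List.pyGetD wordL j "").toList
        (PySem.List.pyGetD wordL i "").toList) = [] := by
    rw [List.filter_eq_nil_iff]
    intro a ha
    rw [PySem.List.mem_pyRange_one] at ha
    simp [show ¬ i < a by omega]
  rw [h1, List.nil_append]
  apply List.filter_congr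
  intro j hj
  rw [PySem.List.mem_pyRange_one] at hj
  rw [pv_morphB_eq]
  simp [show i < j by omega]

-- ===== VERDICT =====
theorem buildedgeL_spec : Claim_equal_buildedgeL := by
  intro wordL _ _
  unfold Spec_buildedgeL
  exact pv_spec wordL
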